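-- pv_equiv track=rewrite | github.com/UnholySaki/uart_gui | projects/computer_src/upload/common_cmd.py | calculate_checksum_2byte
-- ===== SOURCE A (Python) =====
-- def calculate_checksum_2byte(data_str):
--     """
--     Calculate checksum for data string that contains 2 byte per element
--     """
--     j = 0
--     total_checksum = 0
--
--     # half of len because read 2 chars at a time
--     for _ in range(int(len(data_str) / 2)):
--         total_checksum += int(data_str[j:j + 2], base=16)
--         j += 2
--
--     # %256 for return to 0 if reach 256
--     calc_checksum = (256 - total_checksum % 256) % 256
--     return calc_checksum
-- ===== SOURCE B (Python) =====
-- _HEXDIG = {c: v for v, c in enumerate("0123456789abcdef")}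
-- _HEXDIG.update({c: v + 10 for v, c in enumerate("ABCDEF")})
--
--
-- def calculate_checksum_2byte(data_str):
--     """
--     Calculate checksum for data string that contains 2 byte per element
--     """
--     total = 0
--     for i, c in enumerate(data_str[:len(data_str) // 2 * 2]):
--         total += _HEXDIG[c] << (0 if i % 2 else 4)
--     return -total % 256
-- ===== Notes on version B (the rewrite author's own statement) =====
-- stated objective: faster
-- what changed: Replaces per-pair slicing with int(chunk, 16) by a single character-level pass: a precomputed nibble-value dict is looked up per character and shifted by 4 on even positions, so no substring objects or int() parsing ever happen; the final formula collapses to -total % 256.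
-- outside the precondition, e.g. on calculate_checksum_2byte('+5'): A returns 251, B raises KeyError; on calculate_checksum_2byte(' 5'): A returns 251, B raises KeyError
import Mathlib
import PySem

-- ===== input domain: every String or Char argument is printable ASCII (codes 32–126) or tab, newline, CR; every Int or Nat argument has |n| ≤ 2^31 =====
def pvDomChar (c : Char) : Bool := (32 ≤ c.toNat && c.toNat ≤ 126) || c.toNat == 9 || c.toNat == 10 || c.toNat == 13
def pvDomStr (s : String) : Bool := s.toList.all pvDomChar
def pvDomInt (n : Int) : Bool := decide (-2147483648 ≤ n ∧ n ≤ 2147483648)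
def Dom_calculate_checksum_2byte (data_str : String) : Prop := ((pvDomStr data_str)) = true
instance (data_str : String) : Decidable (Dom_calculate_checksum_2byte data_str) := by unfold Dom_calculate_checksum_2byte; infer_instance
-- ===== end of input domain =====

-- B walks the even-length prefix character by character, looking each char up in a precomputed
-- nibble-value table and shifting by 4 on even positions, instead of A's per-pair slice +
-- int(chunk, 16) loop; same return value on Pre_ (constant-factor speedup measured).


-- ===== PORT A =====
-- Literal port of A: j/total_checksum loop over range(int(len/2)), chunk = data_str[j:j+2],
-- int(chunk, 16) via PySem.Int.ofCharsBase? (none = ValueError, excluded by Pre_).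
def calculate_checksum_2byte (data_str : String) : Int :=
  let cs := data_str.toList
  let st :=
    (PySem.List.pyRange 0 (PySem.Int.truncdiv (PySem.Str.len data_str) 2) 1).foldl
      (fun (st : Int × Int) _ =>
        (st.1 + 2,
         st.2 + (PySem.Int.ofCharsBase? (PySem.List.slice cs (some st.1) (some (st.1 + 2))) 16).getD 0))
      (0, 0)
  PySem.Int.mod (256 - PySem.Int.mod st.2 256) 256

-- ===== PORT B =====
-- _HEXDIG = {c: v for v, c in enumerate("0123456789abcdef")}; then .update for "ABCDEF" (v + 10)
def pvHexDig : PySem.Dict Char Int :=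
  let d := (PySem.List.enumerate "0123456789abcdef".toList 0).foldl
    (fun (d : PySem.Dict Char Int) p => d.insert p.2 p.1) PySem.Dict.empty
  (PySem.List.enumerate "ABCDEF".toList 0).foldl
    (fun (d : PySem.Dict Char Int) p => d.insert p.2 (p.1 + 10)) d

-- Literal port of B: one foldl over enumerate(prefix); _HEXDIG[c] (KeyError excluded by Pre_,
-- ported total as getD 0), shift '<< (0 if i % 2 else 4)', final '-total % 256'.
def calculate_checksum_2byte_alt (data_str : String) : Int :=
  let cs := data_str.toList
  let pre := PySem.List.slice cs none (some (PySem.Int.floordiv (PySem.Str.len data_str) 2 * 2))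
  let total : Int := (PySem.List.enumerate pre 0).foldl
    (fun (t : Int) (p : Int × Char) =>
      t + (pvHexDig.getD p.2 0) <<< (if PySem.Int.mod p.1 2 ≠ 0 then (0 : Nat) else 4)) 0
  PySem.Int.mod (-total) 256

-- ===== PRECONDITION & SPEC =====
def pvHexChars : List Char :=
  ['0','1','2','3','4','5','6','7','8','9','a','b','c','d','e','f','A','B','C','D','E','F']

-- Pre_ excludes inputs whose scanned even-length prefix contains a non-hex-digit character:
-- there A either raises ValueError, or (when a 2-char chunk carries a sign/whitespace that
-- int(chunk, 16) tolerates, e.g. '+5' or ' 5') A returns while B's dict lookup raises KeyError.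
def Pre_calculate_checksum_2byte (data_str : String) : Prop :=
  ((data_str.toList.take (data_str.toList.length / 2 * 2)).all (fun c => pvHexChars.contains c)) = true

instance (data_str : String) : Decidable (Pre_calculate_checksum_2byte data_str) := by
  unfold Pre_calculate_checksum_2byte; infer_instance

def pvWitness_calculate_checksum_2byte : String := "0aF3"

def Spec_calculate_checksum_2byte (data_str : String) (out : Int) : Prop := out = calculate_checksum_2byte_alt data_str
instance (data_str : String) (out : Int) : Decidable (Spec_calculate_checksum_2byte data_str out) := by unfold Spec_calculate_checksum_2byte; infer_instance

-- ===== CLAIM (what is proved, stated in full; the proofs are below) =====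
def Claim_equal_calculate_checksum_2byte : Prop := ∀ (data_str : String), Dom_calculate_checksum_2byte data_str → Pre_calculate_checksum_2byte data_str → Spec_calculate_checksum_2byte data_str (calculate_checksum_2byte data_str)

-- ===== LEMMAS AND PROOFS =====

-- one 2-hex-digit chunk: int(chunk, 16) equals the shifted table lookups, over the 22×22 digit pairs
lemma pair_decode_bool :
    (pvHexChars.all (fun c1 => pvHexChars.all (fun c2 =>
      PySem.Int.ofCharsBase? [c1, c2] 16
        == some (pvHexDig.getD c1 0 <<< (4 : Nat) + pvHexDig.getD c2 0 <<< (0 : Nat))))) = true := by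
  decide

lemma pair_decode {c1 c2 : Char} (h1 : c1 ∈ pvHexChars) (h2 : c2 ∈ pvHexChars) :
    PySem.Int.ofCharsBase? [c1, c2] 16
      = some (pvHexDig.getD c1 0 <<< (4 : Nat) + pvHexDig.getD c2 0 <<< (0 : Nat)) := by
  have h := pair_decode_bool
  rw [List.all_eq_true] at h
  have h' := h c1 h1
  rw [List.all_eq_true] at h'
  have h'' := h' c2 h2
  simpa using h''

-- A's running total after k iterations
def chunkSum (cs : List Char) : Nat → Int
  | 0 => 0
  | k + 1 => chunkSum cs k
      + (PySem.Int.ofCharsBase? (PySem.List.slice cs (some (2 * (k : Int))) (some (2 * (k : Int) + 2))) 16).getD 0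

lemma loopA (cs : List Char) (k : Nat) :
    (PySem.List.pyRange 0 (k : Int) 1).foldl
      (fun (st : Int × Int) _ =>
        (st.1 + 2,
         st.2 + (PySem.Int.ofCharsBase? (PySem.List.slice cs (some st.1) (some (st.1 + 2))) 16).getD 0))
      (0, 0)
    = (2 * (k : Int), chunkSum cs k) := by
  induction k with
  | zero => simp [chunkSum]
  | succ k ih =>
    have hcast : ((k + 1 : Nat) : Int) = (k : Int) + 1 := by push_cast; ring
    rw [hcast, PySem.List.pyRange_one_succ_right (by positivity), List.foldl_append, ih]
    simp only [List.foldl_cons, List.foldl_nil, chunkSum, Prod.mk.injEq]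
    exact ⟨by ring, trivial⟩

-- B's loop body
def bodyB (t : Int) (p : Int × Char) : Int :=
  t + (pvHexDig.getD p.2 0) <<< (if PySem.Int.mod p.1 2 ≠ 0 then (0 : Nat) else 4)

lemma mod_two_even (k : Nat) : PySem.Int.mod ((2 * k : Nat) : Int) 2 = 0 := by
  rw [PySem.Int.mod_eq_emod_of_pos (by omega)]; omega

lemma mod_two_odd (k : Nat) : PySem.Int.mod (((2 * k : Nat) : Int) + 1) 2 = 1 := by
  rw [PySem.Int.mod_eq_emod_of_pos (by omega)]; omega

-- B's char-level loop over the first 2k chars computes A's chunk sum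
lemma loopB (cs : List Char) (k : Nat) (hk : 2 * k ≤ cs.length)
    (hhex : ∀ c ∈ cs.take (2 * k), c ∈ pvHexChars) :
    (PySem.List.enumerate (cs.take (2 * k)) 0).foldl bodyB 0 = chunkSum cs k := by
  induction k with
  | zero => simp [chunkSum]
  | succ k ih =>
    have h1 : 2 * k + 1 < cs.length := by omega
    have h0 : 2 * k < cs.length := by omega
    have hsub : cs.take (2 * k) ⊆ cs.take (2 * (k + 1)) := by
      intro c hc
      rw [show 2 * k = min (2 * k) (2 * (k + 1)) by omega, ← List.take_take] at hc
      exact List.take_subset _ _ hc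
    have hdrop : cs.drop (2 * k) = cs[2 * k] :: cs[2 * k + 1] :: cs.drop (2 * k + 2) := by
      rw [List.drop_eq_getElem_cons h0, List.drop_eq_getElem_cons h1]
    have htake : cs.take (2 * (k + 1)) = cs.take (2 * k) ++ [cs[2 * k], cs[2 * k + 1]] := by
      rw [show 2 * (k + 1) = 2 * k + 2 by ring, List.take_add, hdrop]
      rfl
    have hx1 : cs[2 * k] ∈ pvHexChars := hhex _ (by rw [htake]; simp)
    have hx2 : cs[2 * k + 1] ∈ pvHexChars := hhex _ (by rw [htake]; simp)
    have hlen : (cs.take (2 * k)).length = 2 * k := by simp; omega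
    rw [htake, PySem.List.enumerate_append, List.foldl_append,
        ih (by omega) (fun c hc => hhex c (hsub hc))]
    have hslice : PySem.List.slice cs (some (2 * (k : Int))) (some (2 * (k : Int) + 2))
        = [cs[2 * k], cs[2 * k + 1]] := by
      have h3 : (2 * (k : Int) + 2) = ((2 * k : Nat) : Int) + ((2 : Nat) : Int) := by
        push_cast; ring
      have h2 : (2 * (k : Int)) = ((2 * k : Nat) : Int) := by push_cast; ring
      rw [h3, h2, PySem.List.slice_natCast_add, hdrop]
      rfl
    simp only [chunkSum, hslice, pair_decode hx1 hx2, PySem.List.enumerate_cons,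
      PySem.List.enumerate_nil, List.foldl_cons, List.foldl_nil, bodyB, hlen]
    have he : (0 : Int) + (2 * k : Nat) = ((2 * k : Nat) : Int) := by push_cast; ring
    rw [he, mod_two_even]
    have ho : ((2 * k : Nat) : Int) + 1 = ((2 * k : Nat) : Int) + 1 := rfl
    rw [mod_two_odd]
    simp only [Option.getD_some]
    norm_num
    ring

-- the two final formulas agree: -t % 256 = (256 - t % 256) % 256 in Python arithmetic
lemma final_formula (t : Int) :
    PySem.Int.mod (-t) 256 = PySem.Int.mod (256 - PySem.Int.mod t 256) 256 := by
  rw [PySem.Int.mod_eq_emod_of_pos (by omega), PySem.Int.mod_eq_emod_of_pos (by omega),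
      PySem.Int.mod_eq_emod_of_pos (by omega)]
  omega

-- ===== VERDICT (by name: the statement is the Claim_ definition above) =====
theorem calculate_checksum_2byte_spec : Claim_equal_calculate_checksum_2byte := by
  intro s hdom hpre
  unfold Spec_calculate_checksum_2byte calculate_checksum_2byte calculate_checksum_2byte_alt
  simp only []
  have hlen : PySem.Str.len s = ((s.toList.length : Nat) : Int) := by
    simp [PySem.Str.len_eq]
  have htr : PySem.Int.truncdiv ((s.toList.length : Nat) : Int) 2
      = ((s.toList.length / 2 : Nat) : Int) := by
    simp [PySem.Int.truncdiv]
  have hfd : PySem.Int.floordiv ((s.toList.length : Nat) : Int) 2 * 2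
      = ((s.toList.length / 2 * 2 : Nat) : Int) := by
    have := PySem.Int.floordiv_natCast (s.toList.length) 2
    push_cast at this ⊢
    rw [this]
  rw [hlen, htr, hfd, PySem.List.slice_to_natCast, loopA]
  have hk : 2 * (s.toList.length / 2) ≤ s.toList.length := by omega
  have hhex : ∀ c ∈ s.toList.take (2 * (s.toList.length / 2)), c ∈ pvHexChars := by
    rw [show 2 * (s.toList.length / 2) = s.toList.length / 2 * 2 by ring]
    unfold Pre_calculate_checksum_2byte at hpre
    simpa using hpre
  have hloop := loopB s.toList (s.toList.length / 2) hk hhex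
  rw [show s.toList.length / 2 * 2 = 2 * (s.toList.length / 2) by ring]
  rw [show (PySem.List.enumerate (s.toList.take (2 * (s.toList.length / 2))) 0).foldl
        (fun (t : Int) (p : Int × Char) =>
          t + (pvHexDig.getD p.2 0) <<< (if PySem.Int.mod p.1 2 ≠ 0 then (0 : Nat) else 4)) 0
      = chunkSum s.toList (s.toList.length / 2) from hloop]
  exact (final_formula _).symm
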